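-- pv_equiv track=rewrite | github.com/pypi-data/pypi-mirror-298 | packages/tomoscan/tomoscan-2.0.9-py3-none-any.whl/tomoscan/esrf/identifier/url_utils.py | split_query
-- ===== SOURCE A (Python) =====
-- def split_query(query: str) -> dict:
--     result = dict()
--     for s in query.split("&"):
--         if not s:
--             continue
--         name, _, value = s.partition("=")
--         prev_value = result.get(name)
--         if prev_value:
--             value = join_string(prev_value, value, "/")
--         result[name] = value
--     return result
--
-- def join_string(a: str, b: str, sep: str):
--     aslash = a.endswith(sep)
--     bslash = b.startswith(sep)
--     if aslash and bslash:
--         return a[:-1] + b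
--     elif aslash or bslash:
--         return a + b
--     else:
--         return a + sep + b
-- ===== SOURCE B (Python) =====
-- def split_query(query: str) -> dict:
--     # pass 1: group values per name (first-seen key order), pass 2: fold each group
--     groups = {}
--     for s in query.split("&"):
--         if not s:
--             continue
--         name, _, value = s.partition("=")
--         groups.setdefault(name, []).append(value)
--     return {name: _merge(vals) for name, vals in groups.items()}
--
-- def _merge(vals):
--     acc = ""
--     for v in vals:
--         acc = _join(acc, v) if acc else v
--     return acc
--
-- def _join(a, b):
--     if b.startswith("/"):
--         return a + b[1:] if a.endswith("/") else a + b
--     return a + b if a.endswith("/") else a + "/" + b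
-- ===== Notes on version B (the rewrite author's own statement) =====
-- stated objective: alternative
-- what changed: B replaces A's inline merge-on-insert with two passes: first group all values per name into a dict of lists (first-seen key order), then fold each list into one string with the falsy-accumulator step as the fold's base case.
import Mathlib
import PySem

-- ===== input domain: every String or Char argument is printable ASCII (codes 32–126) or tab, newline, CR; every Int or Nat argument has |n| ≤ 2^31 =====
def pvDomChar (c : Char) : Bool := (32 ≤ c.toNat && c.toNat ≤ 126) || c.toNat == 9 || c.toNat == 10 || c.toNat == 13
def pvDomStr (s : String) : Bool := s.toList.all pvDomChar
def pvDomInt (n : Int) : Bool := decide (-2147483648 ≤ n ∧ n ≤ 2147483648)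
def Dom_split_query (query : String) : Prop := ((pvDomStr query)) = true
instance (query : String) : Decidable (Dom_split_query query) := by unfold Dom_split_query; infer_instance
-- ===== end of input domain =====

-- B re-implements A in two passes (group values per key, then fold each group); equal return value, objective: alternative decomposition.

-- ===== PORT A =====
-- s.partition("=") for the single-char separator '=', returning (before, after):
-- exact because Python's middle component is ignored and the after-part is "" when '=' is absent
def pvPartitionEq (cs : List Char) : List Char × List Char :=
  (cs.takeWhile (· ≠ '='), (cs.dropWhile (· ≠ '=')).tail)

-- join_string(a, b, sep) from A, on List Char; a[:-1] is PySem.List.slice a none (some (-1))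
def pvJoinString (a b sep : List Char) : List Char :=
  let aslash := PySem.Chars.endswith a sep
  let bslash := PySem.Chars.startswith b sep
  if aslash && bslash then PySem.List.slice a none (some (-1)) ++ b
  else if aslash || bslash then a ++ b
  else a ++ sep ++ b

-- one iteration of A's loop (dict values kept as List Char, converted to String at the end)
def pvStepA (d : PySem.Dict String (List Char)) (s : List Char) : PySem.Dict String (List Char) :=
  if s = [] then d
  else
    let name := String.ofList (pvPartitionEq s).1
    let value := (pvPartitionEq s).2
    let value :=
      match d.get? name with
      | some p => if p ≠ [] then pvJoinString p value ['/'] else value  -- `if prev_value:`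
      | none => value
    d.insert name value

def split_query (query : String) : List (String × String) :=
  (((PySem.Chars.splitOn query.toList ['&']).foldl pvStepA PySem.Dict.empty).items).map
    (fun p => (p.1, String.ofList p.2))

-- ===== PORT B =====
-- _join(a, b) from Source B; b[1:] is PySem.List.slice b (some 1) none
def pvJoinSlash (a b : List Char) : List Char :=
  if PySem.Chars.startswith b ['/'] then
    if PySem.Chars.endswith a ['/'] then a ++ PySem.List.slice b (some 1) none else a ++ b
  else
    if PySem.Chars.endswith a ['/'] then a ++ b else a ++ '/' :: b

-- _merge(vals) from Source B
def pvMerge (vals : List (List Char)) : List Char :=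
  vals.foldl (fun acc v => if acc ≠ [] then pvJoinSlash acc v else v) []

-- pass 1 of Source B: groups.setdefault(name, []).append(value)
def pvStepB (d : PySem.Dict String (List (List Char))) (s : List Char) :
    PySem.Dict String (List (List Char)) :=
  if s = [] then d
  else d.modify (String.ofList (pvPartitionEq s).1) [] (· ++ [(pvPartitionEq s).2])

def split_query_alt (query : String) : List (String × String) :=
  (((PySem.Chars.splitOn query.toList ['&']).foldl pvStepB PySem.Dict.empty).items).map
    (fun p => (p.1, String.ofList (pvMerge p.2)))

-- ===== PRECONDITION & SPEC =====
def Spec_split_query (query : String) (out : List (String × String)) : Prop := out = split_query_alt query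
instance (query : String) (out : List (String × String)) : Decidable (Spec_split_query query out) := by unfold Spec_split_query; infer_instance

-- ===== CLAIM (what is proved, stated in full; the proofs are below) =====
def Claim_equal_split_query : Prop := ∀ (query : String), Dom_split_query query → Spec_split_query query (split_query query)

-- ===== LEMMAS AND PROOFS =====

-- merged view of B's dict-of-lists: the dict A maintains
def pvMapV (d : PySem.Dict String (List (List Char))) : PySem.Dict String (List Char) :=
  PySem.Dict.mk (d.items.map (fun p => (p.1, pvMerge p.2)))

theorem pvJoin_eq (a b : List Char) :
    pvJoinSlash a b = pvJoinString a b ['/'] := by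
  unfold pvJoinSlash pvJoinString
  rcases ha : PySem.Chars.endswith a ['/'] <;> rcases hb : PySem.Chars.startswith b ['/'] <;>
    simp only [Bool.and_self, Bool.and_true, Bool.and_false, Bool.or_self, Bool.or_true,
      Bool.or_false, Bool.false_eq_true, if_true, if_false]
  · simp
  · -- both slash: a + b[1:]  =  a[:-1] + b
    rw [PySem.Chars.endswith_iff] at ha
    rw [PySem.Chars.startswith_iff] at hb
    obtain ⟨a', rfl⟩ := ha
    obtain ⟨b', rfl⟩ := hb
    rw [PySem.List.slice_from _ (by omega)]
    simp [pysem]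

theorem pvGet_mk (items : List (String × List (List Char))) (k : String) :
    (PySem.Dict.mk (items.map (fun p => (p.1, pvMerge p.2)))).get? k
      = ((PySem.Dict.mk items).get? k).map pvMerge := by
  induction items with
  | nil => rfl
  | cons p rest ih =>
      rw [List.map_cons, PySem.Dict.get?_mk_cons, PySem.Dict.get?_mk_cons]
      by_cases h : p.1 == k
      · simp [h]
      · simp [h, ih]

theorem pvGet_mapV (d : PySem.Dict String (List (List Char))) (k : String) :
    (pvMapV d).get? k = (d.get? k).map pvMerge := by
  obtain ⟨items⟩ := d
  exact pvGet_mk items k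

theorem pvContains_mapV (d : PySem.Dict String (List (List Char))) (k : String) :
    (pvMapV d).contains k = d.contains k := by
  rw [PySem.Dict.contains_eq_isSome_get?, PySem.Dict.contains_eq_isSome_get?, pvGet_mapV]
  cases d.get? k <;> rfl

theorem pvMapV_insert (d : PySem.Dict String (List (List Char))) (k : String) (w : List (List Char)) :
    pvMapV (d.insert k w) = (pvMapV d).insert k (pvMerge w) := by
  apply PySem.Dict.ext
  rw [show (pvMapV (d.insert k w)).items = (d.insert k w).items.map (fun p => (p.1, pvMerge p.2)) from rfl]
  rw [PySem.Dict.items_insert, PySem.Dict.items_insert, pvContains_mapV]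
  split_ifs with h
  · rw [show (pvMapV d).items = d.items.map (fun p => (p.1, pvMerge p.2)) from rfl, List.map_map, List.map_map]
    apply List.map_congr_left
    intro p _
    by_cases hp : p.1 = k <;> simp [hp]
  · simp [pvMapV]

theorem pvStep_comm (d : PySem.Dict String (List (List Char))) (s : List Char) :
    pvStepA (pvMapV d) s = pvMapV (pvStepB d s) := by
  unfold pvStepA pvStepB
  by_cases hs : s = []
  · simp [hs]
  · simp only [hs, if_false]
    rw [show d.modify (String.ofList (pvPartitionEq s).1) [] (· ++ [(pvPartitionEq s).2])
        = d.insert (String.ofList (pvPartitionEq s).1)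
            (d.getD (String.ofList (pvPartitionEq s).1) [] ++ [(pvPartitionEq s).2]) from rfl]
    rw [pvMapV_insert, pvGet_mapV]
    congr 1
    rw [show pvMerge (d.getD (String.ofList (pvPartitionEq s).1) [] ++ [(pvPartitionEq s).2])
        = (if pvMerge (d.getD (String.ofList (pvPartitionEq s).1) []) ≠ [] then
            pvJoinSlash (pvMerge (d.getD (String.ofList (pvPartitionEq s).1) [])) (pvPartitionEq s).2
          else (pvPartitionEq s).2) from by
      unfold pvMerge; rw [List.foldl_append]; rfl]
    rw [PySem.Dict.getD_eq_get?_getD]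
    rcases h : d.get? (String.ofList (pvPartitionEq s).1) with _ | p
    · simp [pvMerge]
    · simp only [Option.map_some, Option.getD_some]
      by_cases hp : pvMerge p = [] <;> simp [hp, pvJoin_eq]

theorem pvFold_comm (segs : List (List Char)) (d : PySem.Dict String (List (List Char))) :
    segs.foldl pvStepA (pvMapV d) = pvMapV (segs.foldl pvStepB d) := by
  induction segs generalizing d with
  | nil => rfl
  | cons s rest ih => rw [List.foldl_cons, List.foldl_cons, pvStep_comm, ih]

-- ===== VERDICT (by name: the statement is the Claim_ definition above) =====
theorem split_query_spec : Claim_equal_split_query := by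
  intro query _
  unfold Spec_split_query split_query split_query_alt
  rw [show (PySem.Dict.empty : PySem.Dict String (List Char)) = pvMapV PySem.Dict.empty from rfl,
    pvFold_comm]
  rw [show (pvMapV ((PySem.Chars.splitOn query.toList ['&']).foldl pvStepB PySem.Dict.empty)).items
      = ((PySem.Chars.splitOn query.toList ['&']).foldl pvStepB PySem.Dict.empty).items.map
          (fun p => (p.1, pvMerge p.2)) from rfl, List.map_map]
  rfl
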